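-- pv_equiv track=rewrite | github.com/kiliakis/pyscripts | plot/plotting_utilities.py | keep_only
-- ===== SOURCE A (Python) =====
-- def keep_only(header, dir1, to_keep):
--     d = {}
--     for k, values in dir1.items():
--         if k not in d:
--             d[k] = []
--         for h in to_keep:
--             c = header.index(h)
--             list1 = []
--             for v in values:
--                 list1.append(v[c])
--             d[k].append(list1)
--     return d
-- ===== SOURCE B (Python) =====
-- def keep_only(header, dir1, to_keep):
--     indices = [header.index(h) for h in to_keep]
--     d = {}
--     for k, values in dir1.items():
--         cols = [[] for _ in to_keep]
--         for v in values:
--             for col, c in zip(cols, indices):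
--                 col.append(v[c])
--         d[k] = cols
--     return d
-- ===== Notes on version B (the rewrite author's own statement) =====
-- stated objective: alternative
-- what changed: B precomputes the header indices once and fills all columns of a key in one row-major pass over values (zip of pre-allocated per-column accumulators with the index list), instead of A's per-key, per-header header.index call followed by a separate column-major scan of values for each kept header.
-- outside the precondition, e.g. on keep_only([], {}, ['y']): A returns {}, B raises ValueError
import Mathlib
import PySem

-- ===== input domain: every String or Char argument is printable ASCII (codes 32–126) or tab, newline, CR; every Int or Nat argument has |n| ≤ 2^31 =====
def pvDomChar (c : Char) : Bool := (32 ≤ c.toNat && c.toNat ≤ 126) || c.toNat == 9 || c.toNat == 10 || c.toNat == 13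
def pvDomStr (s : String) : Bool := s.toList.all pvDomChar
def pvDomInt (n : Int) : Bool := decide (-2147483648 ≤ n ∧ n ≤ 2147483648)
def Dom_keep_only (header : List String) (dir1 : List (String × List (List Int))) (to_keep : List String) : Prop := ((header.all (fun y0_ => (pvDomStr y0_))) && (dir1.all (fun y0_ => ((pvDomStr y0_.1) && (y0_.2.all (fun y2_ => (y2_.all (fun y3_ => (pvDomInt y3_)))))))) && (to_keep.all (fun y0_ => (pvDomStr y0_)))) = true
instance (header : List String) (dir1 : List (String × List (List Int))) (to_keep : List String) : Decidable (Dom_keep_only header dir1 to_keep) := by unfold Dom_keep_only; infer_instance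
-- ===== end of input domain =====

-- B precomputes the column indices once and fills all columns of a key in a single row-major pass over values
-- (A re-scans values once per kept header and calls header.index per key and header); objective: alternative decomposition.

-- ===== PORT A =====
-- literal port of A; header.index(h) → index? (ValueError excluded by Pre_), v[c] → pyGetD (IndexError excluded
-- by Pre_), d[k].append(list1) → Dict.modify (the key is present: the guard above inserted it)
def keep_only (header : List String) (dir1 : List (String × List (List Int))) (to_keep : List String) : List (String × List (List Int)) :=
  (dir1.foldl (fun d kv =>
      let d1 := if d.contains kv.1 = false then d.insert kv.1 [] else d
      to_keep.foldl (fun d2 h =>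
        let c : Nat := (PySem.List.index? header h).getD 0
        let list1 := kv.2.foldl (fun l v => l ++ [PySem.List.pyGetD v (c : Int) 0]) []
        d2.modify kv.1 [] (fun cols => cols ++ [list1])) d1)
    PySem.Dict.empty).items

-- ===== PORT B =====
-- port of B; Python's zip loop appends one element to each paired column object in place, which rebuilds
-- cols as a map over cols.zip indices (exact: zip stops at the shorter list, appends keep order)
def keep_only_alt (header : List String) (dir1 : List (String × List (List Int))) (to_keep : List String) : List (String × List (List Int)) :=
  let indices : List Nat := to_keep.map (fun h => (PySem.List.index? header h).getD 0)
  (dir1.foldl (fun d kv =>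
      let cols := kv.2.foldl
        (fun cols v => (cols.zip indices).map (fun p => p.1 ++ [PySem.List.pyGetD v (p.2 : Int) 0]))
        (to_keep.map (fun _ => ([] : List Int)))
      d.insert kv.1 cols)
    PySem.Dict.empty).items

-- ===== PRECONDITION & SPEC =====
-- Pre_ excludes (i) association lists with duplicate keys, which no Python dict can represent (dict construction
-- collapses them before keep_only is called), and (ii) inputs where header.index(h) raises ValueError (h not in
-- header) or v[c] raises IndexError (row shorter than the column index); a kept header missing from header is
-- excluded even when dir1 is empty (A then returns {} only because its index call sits inside the never-entered
-- key loop, while B's eager index precompute raises ValueError).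
def Pre_keep_only (header : List String) (dir1 : List (String × List (List Int))) (to_keep : List String) : Prop :=
  (dir1.map Prod.fst).Nodup ∧
  ∀ h ∈ to_keep, h ∈ header ∧ ∀ kv ∈ dir1, ∀ v ∈ kv.2, List.idxOf h header < v.length
instance (header : List String) (dir1 : List (String × List (List Int))) (to_keep : List String) : Decidable (Pre_keep_only header dir1 to_keep) := by unfold Pre_keep_only; infer_instance
def pvWitness_keep_only : List String × (List (String × List (List Int))) × List String :=
  (["a", "b"], [("k", [[1, 2], [3, 4]]), ("l", [])], ["b", "a"])
def Spec_keep_only (header : List String) (dir1 : List (String × List (List Int))) (to_keep : List String) (out : List (String × List (List Int))) : Prop := out = keep_only_alt header dir1 to_keep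
instance (header : List String) (dir1 : List (String × List (List Int))) (to_keep : List String) (out : List (String × List (List Int))) : Decidable (Spec_keep_only header dir1 to_keep out) := by unfold Spec_keep_only; infer_instance

-- ===== CLAIM (what is proved, stated in full; the proofs are below) =====
def Claim_equal_keep_only : Prop := ∀ (header : List String) (dir1 : List (String × List (List Int))) (to_keep : List String), Dom_keep_only header dir1 to_keep → Pre_keep_only header dir1 to_keep → Spec_keep_only header dir1 to_keep (keep_only header dir1 to_keep)

-- ===== LEMMAS AND PROOFS =====

-- inserting twice at the same key is inserting the last value
theorem pvInsertInsert {κ ν : Type} [BEq κ] [LawfulBEq κ] (d : PySem.Dict κ ν) (k : κ) (v w : ν) :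
    (d.insert k v).insert k w = d.insert k w := by
  cases d with
  | mk items =>
    by_cases hc : (items.any fun p => p.1 == k) = true
    · have hc2 : ((List.map (fun p => if (p.1 == k) = true then (k, v) else p) items).any fun p => p.1 == k) = true := by
        obtain ⟨p, hp, hpk⟩ := List.any_eq_true.mp hc
        refine List.any_eq_true.mpr ⟨if (p.1 == k) = true then (k, v) else p, List.mem_map_of_mem hp, ?_⟩
        simp [hpk]
      simp only [PySem.Dict.insert, PySem.Dict.contains, hc, hc2, if_true, List.map_map]
      refine congrArg PySem.Dict.mk (List.map_congr_left ?_)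
      intro q _
      by_cases h : (q.1 == k) = true <;> simp [Function.comp, h]
    · have hc1 : (items.any fun p => p.1 == k) = false := Bool.eq_false_iff.mpr hc
      have hc2 : (((items ++ [(k, v)]).any fun p => p.1 == k)) = true := by simp
      have hkeys : ∀ q ∈ items, (q.1 == k) = false := fun q hq =>
        Bool.eq_false_iff.mpr (List.any_eq_false.mp hc1 q hq)
      have hid : items.map (fun p => if (p.1 == k) = true then (k, w) else p) = items := by
        have h2 : items.map (fun p => if (p.1 == k) = true then (k, w) else p) = items.map id :=
          List.map_congr_left (by intro q hq; simp [hkeys q hq])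
        simpa using h2
      simp only [PySem.Dict.insert, PySem.Dict.contains, hc1, hc2, if_true,
        Bool.false_eq_true, if_false, List.map_append, hid]
      simp

-- A's inner loop over to_keep: repeated d[k].append starting from d[k] = acc
theorem pvFoldlModifyAppend (F : String → List Int) (L : List String) :
    ∀ (d : PySem.Dict String (List (List Int))) (k : String) (acc : List (List Int)),
    L.foldl (fun d2 h => d2.modify k [] (fun cols => cols ++ [F h])) (d.insert k acc)
      = d.insert k (acc ++ L.map F) := by
  induction L with
  | nil => intro d k acc; simp
  | cons h t ih =>
    intro d k acc
    have hmod : (d.insert k acc).modify k [] (fun cols => cols ++ [F h]) = d.insert k (acc ++ [F h]) := by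
      simp only [PySem.Dict.modify, PySem.Dict.getD_insert_self]
      exact pvInsertInsert d k acc (acc ++ [F h])
    simp only [List.foldl_cons, hmod, ih, List.map_cons]
    simp [List.append_assoc]

-- zipping a mapped list with its own index list
theorem pvZipMap (g : Nat → List Int) (q : Nat → List Int) (idx : List Nat) :
    ((idx.map g).zip idx).map (fun p => p.1 ++ q p.2) = idx.map (fun c => g c ++ q c) := by
  induction idx with
  | nil => simp
  | cons c cs ih => simp [ih]

-- B's row-major pass characterised column-wise
theorem pvFoldlRows (idx : List Nat) (rows : List (List Int)) :
    ∀ g : Nat → List Int,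
    rows.foldl (fun cols v => (cols.zip idx).map (fun p => p.1 ++ [PySem.List.pyGetD v (p.2 : Int) 0])) (idx.map g)
      = idx.map (fun c => g c ++ rows.map (fun v => PySem.List.pyGetD v (c : Int) 0)) := by
  induction rows with
  | nil => intro g; simp
  | cons v vs ih =>
    intro g
    simp only [List.foldl_cons, pvZipMap g (fun c => [PySem.List.pyGetD v (c : Int) 0]) idx,
      ih (fun c => g c ++ [PySem.List.pyGetD v (c : Int) 0])]
    refine List.map_congr_left ?_
    intro c _
    simp

-- the common per-key value
def pvVal (header to_keep : List String) (values : List (List Int)) : List (List Int) :=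
  to_keep.map (fun h => values.map (fun v => PySem.List.pyGetD v (((PySem.List.index? header h).getD 0 : Nat) : Int) 0))

theorem pvAFold (header to_keep : List String) :
    ∀ (dir1 : List (String × List (List Int))) (d : PySem.Dict String (List (List Int))),
    (dir1.map Prod.fst).Nodup → (∀ kv ∈ dir1, d.contains kv.1 = false) →
    dir1.foldl (fun d kv =>
      to_keep.foldl (fun d2 h =>
        d2.modify kv.1 [] (fun cols => cols ++ [kv.2.foldl (fun l v => l ++ [PySem.List.pyGetD v (((PySem.List.index? header h).getD 0 : Nat) : Int) 0]) []]))
        (if d.contains kv.1 = false then d.insert kv.1 [] else d)) d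
    = dir1.foldl (fun d kv => d.insert kv.1 (pvVal header to_keep kv.2)) d := by
  intro dir1
  induction dir1 with
  | nil => intro d _ _; rfl
  | cons kv t ih =>
    intro d hnd hfresh
    have hc : d.contains kv.1 = false := hfresh kv (List.mem_cons_self ..)
    have hnd' : kv.1 ∉ t.map Prod.fst ∧ (t.map Prod.fst).Nodup := by
      rw [List.map_cons] at hnd; exact List.nodup_cons.mp hnd
    simp only [List.foldl_cons]
    rw [if_pos hc]
    have hstep : (to_keep.foldl (fun d2 h =>
          d2.modify kv.1 [] (fun cols => cols ++ [kv.2.foldl (fun l v => l ++ [PySem.List.pyGetD v (((PySem.List.index? header h).getD 0 : Nat) : Int) 0]) []]))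
          (d.insert kv.1 []))
        = d.insert kv.1 (pvVal header to_keep kv.2) := by
      rw [pvFoldlModifyAppend (fun h => kv.2.foldl (fun l v => l ++ [PySem.List.pyGetD v (((PySem.List.index? header h).getD 0 : Nat) : Int) 0]) []) to_keep d kv.1 []]
      unfold pvVal
      congr 1
      simp only [List.nil_append]
      refine List.map_congr_left ?_
      intro h _
      exact PySem.List.foldl_append_singleton_eq_map ..
    rw [hstep]
    apply ih
    · exact hnd'.2
    · intro kv' h'
      rw [PySem.Dict.contains_insert]
      have hne : kv'.1 ≠ kv.1 := by
        intro he
        apply hnd'.1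
        rw [← he]
        exact List.mem_map_of_mem h'
      simp [hne, hfresh kv' (List.mem_cons_of_mem _ h')]

theorem pvBFold (header to_keep : List String) (dir1 : List (String × List (List Int))) (d : PySem.Dict String (List (List Int))) :
    dir1.foldl (fun d kv =>
      d.insert kv.1 (kv.2.foldl
        (fun cols v => (cols.zip (to_keep.map (fun h => (PySem.List.index? header h).getD 0))).map (fun p => p.1 ++ [PySem.List.pyGetD v (p.2 : Int) 0]))
        (to_keep.map (fun _ => ([] : List Int))))) d
    = dir1.foldl (fun d kv => d.insert kv.1 (pvVal header to_keep kv.2)) d := by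
  have hfun : (fun (d : PySem.Dict String (List (List Int))) (kv : String × List (List Int)) =>
      d.insert kv.1 (kv.2.foldl
        (fun cols v => (cols.zip (to_keep.map (fun h => (PySem.List.index? header h).getD 0))).map (fun p => p.1 ++ [PySem.List.pyGetD v (p.2 : Int) 0]))
        (to_keep.map (fun _ => ([] : List Int)))))
      = (fun d kv => d.insert kv.1 (pvVal header to_keep kv.2)) := by
    funext d kv
    have hinit : to_keep.map (fun _ => ([] : List Int))
        = (to_keep.map (fun h => (PySem.List.index? header h).getD 0)).map (fun _ => ([] : List Int)) := by
      rw [List.map_map]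
      rfl
    rw [hinit, pvFoldlRows (to_keep.map (fun h => (PySem.List.index? header h).getD 0)) kv.2 (fun _ => ([] : List Int))]
    unfold pvVal
    rw [List.map_map]
    rfl
  rw [hfun]

-- ===== VERDICT (by name: the statement is the Claim_ definition above) =====
theorem keep_only_spec : Claim_equal_keep_only := by
  intro header dir1 to_keep _ hpre
  show keep_only header dir1 to_keep = keep_only_alt header dir1 to_keep
  simp only [keep_only, keep_only_alt]
  congr 1
  rw [pvAFold header to_keep dir1 PySem.Dict.empty hpre.1 (fun kv _ => by simp)]
  rw [pvBFold header to_keep dir1 PySem.Dict.empty]
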